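-- pv_equiv track=rewrite | github.com/maxbergmark/misc-scripts | codegolf/find_minimum_letters.py | find_letters
-- ===== SOURCE A (Python) =====
-- def find_letters(messages):
-- 	res = ""
-- 	for message in messages:
-- 		for letter in message:
-- 			in_res = res.count(letter)
-- 			in_message = message.count(letter)
--
-- 			if in_res < in_message:
-- 				res += (in_message - in_res)*letter
--
-- 	return ''.join(sorted(res.replace(" ", "")))
-- ===== SOURCE B (Python) =====
-- def find_letters(messages):
--     # character-major: collect the distinct characters, drop the space,
--     # then emit each character repeated by its maximum per-message count, in sorted order
--     chars = set()
--     for m in messages: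
--         chars.update(m)
--     chars.discard(" ")
--     return ''.join(ch * max((m.count(ch) for m in messages), default=0)
--                    for ch in sorted(chars))
-- ===== Notes on version B (the rewrite author's own statement) =====
-- stated objective: alternative
-- what changed: A grows a result string message-by-message, topping up each letter's count by string-count comparisons inside a double loop and filtering spaces at the end; B is character-major: it builds the set of characters once, discards ' ', and for each character independently emits it repeated by its maximum per-message count, joined in sorted order.
import Mathlib
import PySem

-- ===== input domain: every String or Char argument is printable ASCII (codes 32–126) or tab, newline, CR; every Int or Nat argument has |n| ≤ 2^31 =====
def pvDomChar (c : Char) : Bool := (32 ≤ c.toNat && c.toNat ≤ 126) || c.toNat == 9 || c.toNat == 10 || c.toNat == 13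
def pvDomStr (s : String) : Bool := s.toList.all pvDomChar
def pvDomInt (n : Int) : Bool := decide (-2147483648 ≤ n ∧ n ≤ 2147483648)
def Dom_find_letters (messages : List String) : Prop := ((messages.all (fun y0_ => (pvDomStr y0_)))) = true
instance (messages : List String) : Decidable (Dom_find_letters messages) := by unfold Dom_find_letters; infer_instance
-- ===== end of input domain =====

-- B replaces A's message-major accumulation of a growing result string by a character-major
-- pass: build the set of characters, drop ' ', and emit each character repeated by its maximum
-- per-message count in sorted order (objective: alternative decomposition, same cost).

-- ===== PORT A =====
def find_letters (messages : List String) : String :=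
  let res : List Char := messages.foldl (fun res message =>
    message.toList.foldl (fun res letter =>
      let in_res := res.count letter
      let in_message := message.toList.count letter
      if in_res < in_message then res ++ List.replicate (in_message - in_res) letter else res)
      res) []
  String.ofList (PySem.List.sorted (PySem.Chars.replace res [' '] []) (fun c => c) false)

-- ===== PORT B =====
def find_letters_alt (messages : List String) : String :=
  let chars : PySem.Set Char := messages.foldl (fun s m => PySem.Set.update s m.toList) PySem.Set.empty
  let chars' : PySem.Set Char := PySem.Set.discard chars ' '
  String.ofList (PySem.Chars.join []
    ((PySem.List.sorted chars' (fun c => c) false).map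
      (fun ch => List.replicate (PySem.List.maxD (messages.map (fun m => m.toList.count ch)) (fun x => x) 0) ch)))

-- ===== PRECONDITION & SPEC =====
def Spec_find_letters (messages : List String) (out : String) : Prop := out = find_letters_alt messages
instance (messages : List String) (out : String) : Decidable (Spec_find_letters messages out) := by unfold Spec_find_letters; infer_instance

-- ===== CLAIM (what is proved, stated in full; the proofs are below) =====
def Claim_equal_find_letters : Prop := ∀ (messages : List String), Dom_find_letters messages → Spec_find_letters messages (find_letters messages)

-- ===== LEMMAS AND PROOFS =====

theorem replace_space_go (fuel : Nat) : ∀ (l acc : List Char), l.length ≤ fuel →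
    PySem.Chars.replace.go [' '] [] fuel l acc = acc.reverse ++ l.filter (fun c => c ≠ ' ') := by
  induction fuel with
  | zero =>
    intro l acc h
    have : l = [] := List.eq_nil_of_length_eq_zero (Nat.le_zero.mp h)
    subst this; simp [PySem.Chars.replace.go]
  | succ n ih =>
    intro l acc h
    match l with
    | [] => simp [PySem.Chars.replace.go]
    | c :: t =>
      simp only [PySem.Chars.replace.go]
      by_cases hc : c = ' '
      · subst hc
        have hp : List.isPrefixOf [' '] (' ' :: t) = true := by simp [List.isPrefixOf]
        rw [if_pos hp]
        simp only [List.length, List.drop_succ_cons, List.drop_zero, List.reverse_nil, List.nil_append]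
        rw [ih t acc (by simpa using Nat.le_of_succ_le_succ h)]
        simp
      · have hp : List.isPrefixOf [' '] (c :: t) = false := by
          simp [List.isPrefixOf]
          intro hh; exact absurd hh.symm hc
        rw [if_neg (by simp [hp])]
        rw [ih t (c :: acc) (by simpa using Nat.le_of_succ_le_succ h)]
        simp [hc]

theorem replace_space (cs : List Char) :
    PySem.Chars.replace cs [' '] [] = cs.filter (fun c => c ≠ ' ') := by
  simp [PySem.Chars.replace, replace_space_go cs.length cs [] (le_refl _)]

theorem maxD_id_zero (xs : List Nat) : PySem.List.maxD xs (fun x => x) 0 = xs.foldl max 0 := by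
  cases xs with
  | nil => rfl
  | cons x t =>
    simp [PySem.List.maxD, PySem.List.max?_id_cons, List.foldl_cons]

theorem foldl_max_zero (xs : List Nat) (h : ∀ x ∈ xs, x = 0) : xs.foldl max 0 = 0 := by
  induction xs with
  | nil => rfl
  | cons x t ih =>
    have hx := h x (by simp)
    simp [List.foldl_cons, hx]
    exact ih (fun y hy => h y (by simp [hy]))

theorem join_nil_flatten (parts : List (List Char)) : PySem.Chars.join [] parts = parts.flatten := by
  simp [PySem.Chars.join, List.intercalate]
  induction parts with
  | nil => rfl
  | cons p t ih => cases t <;> simp_all [List.intersperse]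


theorem inner_count (ms : List Char) : ∀ (ls : List Char) (res : List Char) (ch : Char),
    (ls.foldl (fun res letter =>
      let in_res := res.count letter
      let in_message := ms.count letter
      if in_res < in_message then res ++ List.replicate (in_message - in_res) letter else res) res).count ch
    = if ch ∈ ls then max (res.count ch) (ms.count ch) else res.count ch := by
  intro ls
  induction ls with
  | nil => intro res ch; simp
  | cons l t ih =>
    intro res ch
    rw [List.foldl_cons, ih]
    have hg : (if res.count l < ms.count l then res ++ List.replicate (ms.count l - res.count l) l else res).count ch
        = if ch = l then max (res.count ch) (ms.count ch) else res.count ch := by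
      by_cases hlt : res.count l < ms.count l
      · rw [if_pos hlt]
        by_cases hcl : ch = l
        · subst hcl; simp [List.count_append]; omega
        · simp only [List.count_append, List.count_replicate, if_neg hcl]
          have : ¬ (l = ch) := fun h => hcl h.symm
          simp [this]
      · rw [if_neg hlt]
        by_cases hcl : ch = l
        · subst hcl; simp; omega
        · simp [hcl]
    rw [hg]
    by_cases hct : ch ∈ t <;> by_cases hcl : ch = l <;> simp [hct, hcl] <;> omega

theorem outer_count (ms : List String) : ∀ (res : List Char) (ch : Char),
    (ms.foldl (fun res message =>
      message.toList.foldl (fun res letter =>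
        let in_res := res.count letter
        let in_message := message.toList.count letter
        if in_res < in_message then res ++ List.replicate (in_message - in_res) letter else res)
        res) res).count ch
    = (ms.map (fun m => m.toList.count ch)).foldl max (res.count ch) := by
  induction ms with
  | nil => intro res ch; simp
  | cons m t ih =>
    intro res ch
    rw [List.foldl_cons, ih, List.map_cons, List.foldl_cons]
    congr 1
    rw [inner_count m.toList m.toList res ch]
    by_cases hm : ch ∈ m.toList
    · simp [hm]
    · simp [hm, List.count_eq_zero_of_not_mem hm]

theorem mem_charsfold (ms : List String) : ∀ (s : PySem.Set Char) (ch : Char),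
    ch ∈ ms.foldl (fun s m => PySem.Set.update s m.toList) s ↔ ch ∈ s ∨ ∃ m ∈ ms, ch ∈ m.toList := by
  induction ms with
  | nil => intro s ch; simp
  | cons m t ih =>
    intro s ch
    rw [List.foldl_cons, ih]
    rw [PySem.Set.mem_update]
    simp only [List.mem_cons, exists_eq_or_imp]
    tauto

theorem nodup_charsfold (ms : List String) : ∀ (s : PySem.Set Char), s.Nodup →
    (ms.foldl (fun s m => PySem.Set.update s m.toList) s).Nodup := by
  induction ms with
  | nil => intro s h; exact h
  | cons m t ih =>
    intro s h
    exact ih _ (PySem.Set.nodup_update s m.toList h)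

theorem flat_count (n : Char → Nat) : ∀ (S : List Char), S.Nodup → ∀ ch,
    ((S.map (fun c => List.replicate (n c) c)).flatten).count ch = if ch ∈ S then n ch else 0 := by
  intro S
  induction S with
  | nil => intro _ ch; simp
  | cons c t ih =>
    intro hnd ch
    have hct : c ∉ t := (List.nodup_cons.mp hnd).1
    rw [List.map_cons, List.flatten_cons, List.count_append, ih (List.nodup_cons.mp hnd).2,
        List.count_replicate]
    by_cases hcl : ch = c
    · subst hcl; simp [hct]
    · have hsy : ¬ c = ch := fun h => hcl h.symm
      simp [hcl, hsy]

theorem flat_sorted (n : Char → Nat) : ∀ (S : List Char), S.Pairwise (· ≤ ·) →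
    ((S.map (fun c => List.replicate (n c) c)).flatten).Pairwise (· ≤ ·) := by
  intro S
  induction S with
  | nil => intro _; simp
  | cons c t ih =>
    intro hp
    rw [List.map_cons, List.flatten_cons]
    rw [List.pairwise_append]
    refine ⟨List.pairwise_replicate.mpr (by simp), ih (List.pairwise_cons.mp hp).2, ?_⟩
    intro a ha b hb
    have hac : a = c := List.eq_of_mem_replicate ha
    obtain ⟨bl, hbl, hbmem⟩ := List.mem_flatten.mp hb
    obtain ⟨c', hc', rfl⟩ := List.mem_map.mp hbl
    have : b = c' := List.eq_of_mem_replicate hbmem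
    rw [hac, this]
    exact (List.pairwise_cons.mp hp).1 c' hc'


theorem find_letters_eq_alt (messages : List String) : find_letters messages = find_letters_alt messages := by
  unfold find_letters find_letters_alt
  apply congrArg String.ofList
  rw [join_nil_flatten, replace_space]
  -- names
  have hchars_nodup : (messages.foldl (fun s m => PySem.Set.update s m.toList) PySem.Set.empty).Nodup :=
    nodup_charsfold messages PySem.Set.empty (by simp [PySem.Set.empty])
  have hchars'_nodup := PySem.Set.nodup_discard _ ' ' hchars_nodup
  have hS_nodup : (PySem.List.sorted (PySem.Set.discard (messages.foldl (fun s m => PySem.Set.update s m.toList) PySem.Set.empty) ' ') (fun c => c) false).Nodup :=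
    (PySem.List.sorted_perm _ _ _).symm.nodup hchars'_nodup
  apply PySem.List.sorted_id_eq_of_perm_of_pairwise
  · rw [List.perm_iff_count]
    intro a
    have hB := flat_count (fun ch => PySem.List.maxD (messages.map (fun m => m.toList.count ch)) (fun x => x) 0) _ hS_nodup a
    rw [hB]
    simp only [maxD_id_zero]
    have hmemS : a ∈ (PySem.List.sorted (PySem.Set.discard (messages.foldl (fun s m => PySem.Set.update s m.toList) PySem.Set.empty) ' ') (fun c => c) false)
        ↔ ((∃ m ∈ messages, a ∈ m.toList) ∧ a ≠ ' ') := by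
      rw [PySem.List.mem_sorted, PySem.Set.mem_discard, mem_charsfold]
      simp [PySem.Set.empty]
    simp only [hmemS]
    by_cases hsp : a = ' '
    · subst hsp
      rw [List.count_eq_zero_of_not_mem (by simp)]
      simp
    · have hcf : List.count a (List.filter (fun c => decide (c ≠ ' ')) _) = List.count a
          ((messages.foldl (fun res message =>
            message.toList.foldl (fun res letter =>
              let in_res := res.count letter
              let in_message := message.toList.count letter
              if in_res < in_message then res ++ List.replicate (in_message - in_res) letter else res)
              res) [])) := List.count_filter (by simp [hsp])
      rw [hcf, outer_count]
      simp only [List.count_nil]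
      by_cases hmem : ∃ m ∈ messages, a ∈ m.toList
      · simp [hmem, hsp]
      · rw [if_neg (fun h => hmem h.1)]
        symm
        apply foldl_max_zero
        intro x hx
        obtain ⟨m, hm, rfl⟩ := List.mem_map.mp hx
        exact List.count_eq_zero_of_not_mem (fun hc => hmem ⟨m, hm, hc⟩)
  · exact flat_sorted _ _ (PySem.List.sorted_pairwise _ _)


-- ===== VERDICT (by name: the statement is the Claim_ definition above) =====
theorem find_letters_spec : Claim_equal_find_letters := by
  intro messages _
  exact find_letters_eq_alt messages
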